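-- pv_equiv track=rewrite | github.com/Suraj5933/JD_Analysis_Bot | app.py | parse_paths
-- ===== SOURCE A (Python) =====
-- def parse_paths(text):
--     paths = {"Vertical": [], "Horizontal": [], "Diagonal": []}
--     current = None
--     for line in text.split("\n"):
--         line = line.strip()
--         if any(key in line for key in paths):
--             current = next((k for k in paths if k in line), None)
--         elif current and line:
--             paths[current].append(line)
--     return paths
-- ===== SOURCE B (Python) =====
-- def parse_paths(text):
--     KEYS = ("Vertical", "Horizontal", "Diagonal")
--
--     def header(line):
--         return next((k for k in KEYS if k in line), None)
--
--     lines = [l.strip() for l in text.split("\n")]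
--     paths = {"Vertical": [], "Horizontal": [], "Diagonal": []}
--     # drop everything before the first header
--     while lines and header(lines[0]) is None:
--         lines.pop(0)
--     # segment the rest at header lines
--     while lines:
--         cat = header(lines.pop(0))
--         seg = []
--         while lines and header(lines[0]) is None:
--             seg.append(lines.pop(0))
--         paths[cat].extend(l for l in seg if l)
--     return paths
-- ===== Notes on version B (the rewrite author's own statement) =====
-- stated objective: alternative
-- what changed: Replaces A's one-pass state machine that tracks the most recent header category per line with a two-phase segmentation: strip all lines up front, drop the preamble before the first header, then repeatedly split off each header's whole segment (span of non-header lines) and extend that category's list with its non-empty lines.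
import Mathlib
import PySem

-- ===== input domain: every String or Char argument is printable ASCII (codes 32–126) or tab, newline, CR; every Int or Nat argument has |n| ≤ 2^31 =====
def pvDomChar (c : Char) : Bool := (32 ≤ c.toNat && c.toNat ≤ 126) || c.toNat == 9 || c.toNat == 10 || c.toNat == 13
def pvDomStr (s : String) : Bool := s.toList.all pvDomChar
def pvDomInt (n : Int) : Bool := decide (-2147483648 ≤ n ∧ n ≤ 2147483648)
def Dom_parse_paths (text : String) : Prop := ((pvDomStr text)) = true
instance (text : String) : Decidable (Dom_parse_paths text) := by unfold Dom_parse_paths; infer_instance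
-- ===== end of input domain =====

-- B segments the stripped lines at header lines instead of running A's per-line state machine; objective: alternative decomposition (same cost).

-- ===== PORT A =====
-- loop body of A's for-loop, as a helper: state = (paths dict, current)
def ppStepA (st : PySem.Dict String (List String) × Option String) (rawline : String) :
    PySem.Dict String (List String) × Option String :=
  let line := PySem.Str.strip rawline
  if st.1.keys.any (fun k => PySem.Str.isIn k line) then
    (st.1, st.1.keys.find? (fun k => PySem.Str.isIn k line))
  else
    match st.2 with
    | some c => if line ≠ "" then (st.1.modify c [] (fun xs => xs ++ [line]), st.2) else st
    | none => st

def parse_paths (text : String) : List (String × List String) :=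
  (((PySem.Str.split? text "\n").getD []).foldl ppStepA
    (PySem.Dict.ofList [("Vertical", []), ("Horizontal", []), ("Diagonal", [])], none)).1.items

-- ===== PORT B =====
-- first key contained in the line, if any (Source B's header())
def ppHdr (line : String) : Option String :=
  ["Vertical", "Horizontal", "Diagonal"].find? (fun k => PySem.Str.isIn k line)

-- Source B's preamble-dropping while loop
def ppSkip : List String → List String
  | [] => []
  | l :: rest => if (ppHdr l).isNone then ppSkip rest else l :: rest

-- Source B's inner while loop: the span of non-header lines (the segment) and the remainder
def ppSpan : List String → List String × List String
  | [] => ([], [])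
  | l :: rest =>
    if (ppHdr l).isNone then
      (l :: (ppSpan rest).1, (ppSpan rest).2)
    else ([], l :: rest)

-- cited by ppGo's decreasing_by
lemma ppSpan_snd_length : ∀ ls : List String, (ppSpan ls).2.length ≤ ls.length := by
  intro ls
  induction ls with
  | nil => simp [ppSpan]
  | cons l rest ih =>
    by_cases h : (ppHdr l).isNone <;> simp [ppSpan, h]
    omega

-- Source B's outer while loop over the segments
def ppGo : PySem.Dict String (List String) → List String → PySem.Dict String (List String)
  | d, [] => d
  | d, l :: rest =>
    ppGo
      (match ppHdr l with
       | some c => d.modify c [] (fun xs => xs ++ ((ppSpan rest).1.filter (fun s => s ≠ "")))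
       | none => d)  -- unreachable: the first line of each segment is a header
      (ppSpan rest).2
termination_by _ ls => ls.length
decreasing_by simpa using Nat.lt_succ_of_le (ppSpan_snd_length rest)

def parse_paths_alt (text : String) : List (String × List String) :=
  let lines := ((PySem.Str.split? text "\n").getD []).map PySem.Str.strip
  (ppGo (PySem.Dict.ofList [("Vertical", []), ("Horizontal", []), ("Diagonal", [])])
    (ppSkip lines)).items

-- ===== PRECONDITION & SPEC =====
def Spec_parse_paths (text : String) (out : List (String × List String)) : Prop := out = parse_paths_alt text
instance (text : String) (out : List (String × List String)) : Decidable (Spec_parse_paths text out) := by unfold Spec_parse_paths; infer_instance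

-- ===== CLAIM (what is proved, stated in full; the proofs are below) =====
def Claim_equal_parse_paths : Prop := ∀ (text : String), Dom_parse_paths text → Spec_parse_paths text (parse_paths text)

-- ===== LEMMAS AND PROOFS =====

def pvK : List String := ["Vertical", "Horizontal", "Diagonal"]

def pvNH (s : String) : Bool := (ppHdr s).isNone

lemma ppHdr_eq (l : String) : ppHdr l = pvK.find? (fun k => PySem.Str.isIn k l) := rfl

lemma ppSkip_eq (ls : List String) : ppSkip ls = ls.dropWhile pvNH := by
  induction ls with
  | nil => rfl
  | cons l rest ih =>
    rw [ppSkip, List.dropWhile_cons]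
    by_cases h : (ppHdr l).isNone <;> simp [pvNH, h, ih]

lemma ppSpan_eq (ls : List String) : ppSpan ls = (ls.takeWhile pvNH, ls.dropWhile pvNH) := by
  induction ls with
  | nil => rfl
  | cons l rest ih =>
    rw [ppSpan.eq_def, List.takeWhile_cons, List.dropWhile_cons]
    by_cases h : (ppHdr l).isNone <;> simp [pvNH, h, ih]

lemma pvMapSubstSelf {k : String} {v : List String} : ∀ (l : List (String × List String)),
    (l.map Prod.fst).Nodup → l.find? (fun p => p.1 == k) = some (k, v) →
    l.map (fun p => if p.1 == k then (k, v) else p) = l := by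
  intro l
  induction l with
  | nil => intro _ h; simp at h
  | cons p t ih =>
    intro hnd hfind
    by_cases hp : p.1 = k
    · have hcond : (fun p : String × List String => p.1 == k) p = true := by simp [hp]
      simp only [List.find?_cons, hcond] at hfind
      have hpv : p = (k, v) := by simpa using hfind
      simp only [List.map_cons, if_pos (by simp [hp] : (p.1 == k) = true)]
      have hknot : k ∉ t.map Prod.fst := by
        simp only [List.map_cons, List.nodup_cons] at hnd
        exact hp ▸ hnd.1
      have htail : t.map (fun p => if p.1 == k then (k, v) else p) = t.map id :=
        List.map_congr_left (fun q hq => by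
          have hq1 : q.1 ≠ k := fun hk => hknot (hk ▸ List.mem_map_of_mem hq)
          simp [hq1])
      rw [htail, List.map_id, hpv]
    · have hcond : (fun p : String × List String => p.1 == k) p = false := by simp [hp]
      simp only [List.find?_cons, hcond] at hfind
      simp only [List.map_cons, if_neg (by simp [hp] : ¬ (p.1 == k) = true)]
      rw [ih (by simp only [List.map_cons, List.nodup_cons] at hnd; exact hnd.2) hfind]

lemma pvInsertInsertSelf {κ ν : Type} [BEq κ] [LawfulBEq κ] (d : PySem.Dict κ ν) (k : κ) (v w : ν) :
    (d.insert k v).insert k w = d.insert k w := by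
  by_cases hc : d.contains k = true
  · apply PySem.Dict.ext
    rw [PySem.Dict.items_insert_of_contains _ _ (PySem.Dict.contains_insert_self d k v),
        PySem.Dict.items_insert_of_contains _ _ hc, PySem.Dict.items_insert_of_contains _ _ hc,
        List.map_map]
    apply List.map_congr_left
    intro p _
    by_cases hp : (p.1 == k) = true <;> simp [hp]
  · have hc' : d.contains k = false := by simpa using hc
    apply PySem.Dict.ext
    rw [PySem.Dict.items_insert_of_contains _ _ (PySem.Dict.contains_insert_self d k v),
        PySem.Dict.items_insert_of_not_contains _ _ hc',
        PySem.Dict.items_insert_of_not_contains _ _ hc', List.map_append]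
    have hno : ∀ p ∈ d.items, (p.1 == k) = false := by
      intro p hp
      by_contra h
      have : d.contains k = true := by
        unfold PySem.Dict.contains
        exact List.any_eq_true.mpr ⟨p, hp, by simpa using h⟩
      simp [this] at hc'
    have hmap : d.items.map (fun p => if (p.1 == k) = true then (k, w) else p) = d.items.map id :=
      List.map_congr_left (fun p hp => by simp [hno p hp])
    rw [hmap, List.map_id]
    simp

lemma pvInsertGetDSelf (d : PySem.Dict String (List String)) (k : String) (d0 : List String)
    (hnd : d.keys.Nodup) (hc : d.contains k = true) : d.insert k (d.getD k d0) = d := by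
  obtain ⟨p, hpmem, hpk⟩ : ∃ p ∈ d.items, (p.1 == k) = true := by
    unfold PySem.Dict.contains at hc
    exact List.any_eq_true.mp hc
  obtain ⟨q, hfind⟩ : ∃ q, d.items.find? (fun p => p.1 == k) = some q :=
    Option.isSome_iff_exists.mp (List.find?_isSome.mpr ⟨p, hpmem, hpk⟩)
  have hqk : q.1 = k := by simpa using List.find?_some hfind
  have hgetD : d.getD k d0 = q.2 := by
    unfold PySem.Dict.getD PySem.Dict.get?
    rw [hfind]; rfl
  apply PySem.Dict.ext
  rw [PySem.Dict.items_insert_of_contains _ _ hc, hgetD]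
  have hfind' : d.items.find? (fun p => p.1 == k) = some (k, q.2) := by
    rw [hfind, ← hqk]
  exact pvMapSubstSelf d.items hnd hfind'

lemma pvModifyModifySelf (d : PySem.Dict String (List String)) (k : String) (d0 : List String)
    (f g : List String → List String) :
    (d.modify k d0 f).modify k d0 g = d.modify k d0 (fun x => g (f x)) := by
  unfold PySem.Dict.modify
  rw [PySem.Dict.getD_insert_self, pvInsertInsertSelf]

lemma pvModifyId (d : PySem.Dict String (List String)) (k : String) (d0 : List String)
    (hnd : d.keys.Nodup) (hc : d.contains k = true) : d.modify k d0 (fun xs => xs) = d := by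
  unfold PySem.Dict.modify
  exact pvInsertGetDSelf d k d0 hnd hc

lemma pvKeysModifyOfContains (d : PySem.Dict String (List String)) (k : String) (d0 : List String)
    (f : List String → List String) (hc : d.contains k = true) : (d.modify k d0 f).keys = d.keys := by
  rw [PySem.Dict.keys_modify]
  exact PySem.Dict.keys_insert_of_contains d _ hc

def ppUpd (d : PySem.Dict String (List String)) (cur : Option String) (L : List String) :
    PySem.Dict String (List String) :=
  match cur with
  | none => d
  | some c => d.modify c [] (fun xs => xs ++ (L.takeWhile pvNH).filter (fun s => s ≠ ""))

lemma foldA_eq : ∀ (lines : List String) (d : PySem.Dict String (List String)) (cur : Option String),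
    d.keys = pvK → (∀ c, cur = some c → d.contains c = true) →
    (lines.foldl ppStepA (d, cur)).1
      = ppGo (ppUpd d cur (lines.map PySem.Str.strip)) ((lines.map PySem.Str.strip).dropWhile pvNH) := by
  intro lines
  induction lines with
  | nil =>
    intro d cur hkeys hcur
    have hnd : d.keys.Nodup := by rw [hkeys]; decide
    simp only [List.foldl_nil, List.map_nil, List.dropWhile_nil]
    cases cur with
    | none => simp only [ppUpd, ppGo]
    | some c =>
      simp only [ppUpd, ppGo]
      have hfn : (fun xs : List String =>
          xs ++ (List.takeWhile pvNH ([] : List String)).filter (fun s => s ≠ "")) = fun xs => xs := by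
        funext xs; simp
      rw [hfn, pvModifyId d c [] hnd (hcur c rfl)]
  | cons l t ih =>
    intro d cur hkeys hcur
    have hnd : d.keys.Nodup := by rw [hkeys]; decide
    simp only [List.foldl_cons, List.map_cons]
    cases hh : ppHdr (PySem.Str.strip l) with
    | some k =>
      have hany : d.keys.any (fun k => PySem.Str.isIn k (PySem.Str.strip l)) = true := by
        rw [hkeys]
        have := List.find?_some (ppHdr_eq (PySem.Str.strip l) ▸ hh)
        exact List.any_eq_true.mpr ⟨k, List.mem_of_find?_eq_some (ppHdr_eq (PySem.Str.strip l) ▸ hh), this⟩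
      have hfind : d.keys.find? (fun k => PySem.Str.isIn k (PySem.Str.strip l)) = some k := by
        rw [hkeys, ← ppHdr_eq]; exact hh
      have hstep : ppStepA (d, cur) l = (d, some k) := by
        simp only [ppStepA, hany, if_true, hfind]
      rw [hstep]
      have hck : d.contains k = true := by
        rw [PySem.Dict.contains_iff_mem_keys, hkeys]
        exact List.mem_of_find?_eq_some (ppHdr_eq (PySem.Str.strip l) ▸ hh)
      rw [ih d (some k) hkeys (fun c hc => by injection hc with h; exact h ▸ hck)]
      have hNH : pvNH (PySem.Str.strip l) = false := by simp [pvNH, hh]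
      rw [List.dropWhile_cons, hNH]
      simp only [Bool.false_eq_true, if_false, ppGo, hh, ppSpan_eq]
      have hupd : ppUpd d cur (PySem.Str.strip l :: t.map PySem.Str.strip) = d := by
        cases cur with
        | none => rfl
        | some c =>
          simp only [ppUpd, List.takeWhile_cons, hNH]
          have hfn : (fun xs : List String =>
              xs ++ (List.filter (fun s => s ≠ "") [])) = fun xs => xs := by
            funext xs; simp
          rw [if_neg (by simp), hfn, pvModifyId d c [] hnd (hcur c rfl)]
      rw [hupd]
      rfl
    | none =>
      have hany : d.keys.any (fun k => PySem.Str.isIn k (PySem.Str.strip l)) = false := by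
        rw [hkeys]
        apply List.any_eq_false.mpr
        intro k hk
        have := List.find?_eq_none.mp (ppHdr_eq (PySem.Str.strip l) ▸ hh) k hk
        simpa using this
      have hNH : pvNH (PySem.Str.strip l) = true := by simp [pvNH, hh]
      rw [List.dropWhile_cons, hNH, if_pos rfl]
      cases cur with
      | none =>
        have hstep : ppStepA (d, none) l = (d, none) := by
          simp only [ppStepA, hany]; rfl
        rw [hstep, ih d none hkeys (fun c hc => by cases hc)]
        rfl
      | some c =>
        have hcc : d.contains c = true := hcur c rfl
        by_cases hl : PySem.Str.strip l = ""
        · have hstep : ppStepA (d, some c) l = (d, some c) := by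
            simp only [ppStepA]
            rw [hany]
            simp [hl]
          rw [hstep, ih d (some c) hkeys hcur]
          have hfn : (List.takeWhile pvNH (PySem.Str.strip l :: t.map PySem.Str.strip)).filter
                (fun s => decide (s ≠ ""))
              = (List.takeWhile pvNH (t.map PySem.Str.strip)).filter (fun s => decide (s ≠ "")) := by
            rw [List.takeWhile_cons, hNH]
            simp [hl]
          simp only [ppUpd, hfn]
        · have hstep : ppStepA (d, some c) l
              = (d.modify c [] (fun xs => xs ++ [PySem.Str.strip l]), some c) := by
            simp only [ppStepA]
            rw [hany]
            simp [hl]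
          rw [hstep]
          have hkeys' : (d.modify c [] (fun xs => xs ++ [PySem.Str.strip l])).keys = pvK := by
            rw [pvKeysModifyOfContains d c [] _ hcc, hkeys]
          have hcur' : ∀ c', (some c : Option String) = some c' →
              (d.modify c [] (fun xs => xs ++ [PySem.Str.strip l])).contains c' = true := by
            intro c' hc'
            injection hc' with h
            rw [← h, PySem.Dict.contains_modify]
            simp [hcc]
          rw [ih _ (some c) hkeys' hcur']
          simp only [ppUpd, pvModifyModifySelf]
          have hfn : (fun x : List String => x ++ [PySem.Str.strip l]
                ++ (List.takeWhile pvNH (t.map PySem.Str.strip)).filter (fun s => decide (s ≠ "")))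
              = (fun xs : List String => xs ++ (List.takeWhile pvNH
                  (PySem.Str.strip l :: t.map PySem.Str.strip)).filter (fun s => decide (s ≠ ""))) := by
            funext xs
            rw [List.takeWhile_cons, hNH]
            simp [hl]
          rw [hfn]

-- ===== VERDICT (by name: the statement is the Claim_ definition above) =====
theorem parse_paths_spec : Claim_equal_parse_paths := by
  intro text _
  unfold Spec_parse_paths parse_paths parse_paths_alt
  rw [foldA_eq _ _ none rfl (by intro c h; cases h)]
  simp only [ppSkip_eq, ppUpd]
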